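-- pv_equiv track=rewrite | github.com/Michael0x2a/logic_utils | test_logic.py | generate_envs
-- ===== SOURCE A (Python) =====
-- def generate_envs(atom_names):
--     '''Generates all possible truth table values given a list of atom names'''
--     def build_combos(atom_names):
--         if len(atom_names) == 1:
--             return [[True], [False]]
--         else:
--             prev = build_combos(atom_names[1:])
--             output = [[True] + combo for combo in prev]
--             output = output + [[False] + combo for combo in prev]
--             return output
--     return [dict(zip(atom_names, combo)) for combo in build_combos(atom_names)]
-- ===== SOURCE B (Python) =====
-- def generate_envs(atom_names):
--     '''Generates all possible truth table values given a list of atom names'''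
--     n = len(atom_names)
--     return [
--         dict(zip(atom_names, [(i // 2 ** (n - 1 - j)) % 2 == 0 for j in range(n)]))
--         for i in range(2 ** n)
--     ]
-- ===== Notes on version B (the rewrite author's own statement) =====
-- stated objective: idiomatic
-- what changed: Replaced the recursive build_combos helper by a direct enumeration of i in range(2**n), decoding each combo from i's bits most-significant-first, so no recursion and no intermediate combo lists are kept.
import Mathlib
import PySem

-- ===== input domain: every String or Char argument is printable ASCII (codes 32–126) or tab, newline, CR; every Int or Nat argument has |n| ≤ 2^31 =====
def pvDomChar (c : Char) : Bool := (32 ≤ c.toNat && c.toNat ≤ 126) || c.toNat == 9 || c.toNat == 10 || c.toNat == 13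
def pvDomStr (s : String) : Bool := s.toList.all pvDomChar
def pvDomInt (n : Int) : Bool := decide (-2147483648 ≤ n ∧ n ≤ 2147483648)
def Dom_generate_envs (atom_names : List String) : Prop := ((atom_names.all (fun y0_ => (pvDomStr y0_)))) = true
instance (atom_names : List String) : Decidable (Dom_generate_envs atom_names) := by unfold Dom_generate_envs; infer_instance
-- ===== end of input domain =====

-- B replaces A's recursive combo builder by a direct enumeration of range(2**n) decoded bitwise (idiomatic, no recursion).

-- ===== PORT A =====
-- A's inner helper build_combos; on [] the Python recurses without a base case (RecursionError),
-- that input is excluded by Pre_, so the [] branch value is irrelevant to the claim.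
def pvBuildCombos : List String → List (List Bool)
  | [] => []
  | [_] => [[true], [false]]
  | _ :: x :: rest =>
      let prev := pvBuildCombos (x :: rest)
      (prev.map (fun combo => true :: combo)) ++ (prev.map (fun combo => false :: combo))

def generate_envs (atom_names : List String) : List (List (String × Bool)) :=
  (pvBuildCombos atom_names).map (fun combo => (PySem.Dict.ofList (atom_names.zip combo)).items)

-- ===== PORT B =====
def generate_envs_alt (atom_names : List String) : List (List (String × Bool)) :=
  let n : Nat := atom_names.length
  (PySem.List.pyRange 0 ((2:Int) ^ n) 1).map (fun i =>
    (PySem.Dict.ofList (atom_names.zip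
      ((PySem.List.pyRange 0 (n : Int) 1).map (fun j =>
        decide (PySem.Int.mod (PySem.Int.floordiv i ((2:Int) ^ ((n : Int) - 1 - j).toNat)) 2 = 0))))).items)

-- ===== PRECONDITION & SPEC =====
-- Pre_ excludes only the empty list, on which Python A recurses without a base case and raises RecursionError.
def Pre_generate_envs (atom_names : List String) : Prop := atom_names ≠ []
instance (atom_names : List String) : Decidable (Pre_generate_envs atom_names) := by unfold Pre_generate_envs; infer_instance
def pvWitness_generate_envs : List String := (["p", "q"])

def Spec_generate_envs (atom_names : List String) (out : List (List (String × Bool))) : Prop := out = generate_envs_alt atom_names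
instance (atom_names : List String) (out : List (List (String × Bool))) : Decidable (Spec_generate_envs atom_names out) := by unfold Spec_generate_envs; infer_instance

-- ===== CLAIM (what is proved, stated in full; the proofs are below) =====
def Claim_equal_generate_envs : Prop := ∀ (atom_names : List String), Dom_generate_envs atom_names → Pre_generate_envs atom_names → Spec_generate_envs atom_names (generate_envs atom_names)

-- ===== LEMMAS AND PROOFS =====

-- the combo list B enumerates, restated over Nat: row i, bit j read most-significant-first
def pvNatCombos (n : Nat) : List (List Bool) :=
  (List.range (2 ^ n)).map (fun i =>
    (List.range n).map (fun j => decide ((i / 2 ^ (n - 1 - j)) % 2 = 0)))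

theorem pvNatCombos_succ (n : Nat) :
    pvNatCombos (n + 1) =
      (pvNatCombos n).map (fun c => true :: c) ++ (pvNatCombos n).map (fun c => false :: c) := by
  unfold pvNatCombos
  have h : 2 ^ (n + 1) = 2 ^ n + 2 ^ n := by ring
  have hr : List.range (2 ^ n + 2 ^ n) = List.range (2 ^ n) ++ (List.range (2 ^ n)).map (fun x => 2 ^ n + x) := List.range_add
  rw [h, hr, List.map_append, List.map_map, List.map_map, List.map_map]
  congr 1
  · apply List.map_congr_left
    intro i hi
    simp only [List.mem_range] at hi
    simp only [Function.comp_apply]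
    rw [List.range_succ_eq_map, List.map_cons, List.map_map]
    congr 1
    · have : n + 1 - 1 - 0 = n := by omega
      rw [this, Nat.div_eq_of_lt hi]
      simp
    · apply List.map_congr_left
      intro j hj
      simp only [Function.comp_apply]
      have : n + 1 - 1 - (j + 1) = n - 1 - j := by omega
      rw [this]
  · apply List.map_congr_left
    intro i hi
    simp only [List.mem_range] at hi
    simp only [Function.comp_apply]
    rw [List.range_succ_eq_map, List.map_cons, List.map_map]
    congr 1
    · have h0 : n + 1 - 1 - 0 = n := by omega
      have hdiv : (2 ^ n + i) / 2 ^ n = 1 := by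
        rw [Nat.add_comm, Nat.add_div_right _ (Nat.pow_pos (by omega)), Nat.div_eq_of_lt hi]
      rw [h0, hdiv]
      simp
    · apply List.map_congr_left
      intro j hj
      simp only [List.mem_range] at hj
      simp only [Function.comp_apply]
      have hsub : n + 1 - 1 - (j + 1) = n - 1 - j := by omega
      rw [hsub]
      have hpow : 2 ^ n = 2 ^ (n - 1 - j) * (2 * 2 ^ (n - 1 - (n - 1 - j))) := by
        rw [← pow_succ', ← pow_add]
        congr 1
        omega
      have hdiv : (2 ^ n + i) / 2 ^ (n - 1 - j) = i / 2 ^ (n - 1 - j) + 2 * 2 ^ (n - 1 - (n - 1 - j)) := by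
        rw [hpow, Nat.add_comm, Nat.add_mul_div_left _ _ (Nat.pow_pos (by omega))]
      rw [hdiv]
      exact decide_eq_decide.mpr (by omega)

theorem pvBuildCombos_eq : ∀ (atom_names : List String), atom_names ≠ [] →
    pvBuildCombos atom_names = pvNatCombos atom_names.length
  | [], h => absurd rfl h
  | [_], _ => by
    simp only [pvBuildCombos, List.length_cons, List.length_nil]
    decide
  | _ :: b :: rest, _ => by
    have ih := pvBuildCombos_eq (b :: rest) (by simp)
    simp only [pvBuildCombos, ih, List.length_cons]
    exact (pvNatCombos_succ _).symm

theorem generate_envs_alt_eq (atom_names : List String) :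
    generate_envs_alt atom_names =
      (pvNatCombos atom_names.length).map
        (fun combo => (PySem.Dict.ofList (atom_names.zip combo)).items) := by
  unfold generate_envs_alt pvNatCombos
  set n := atom_names.length with hn
  have h2 : ((2:Int) ^ n) = ((2 ^ n : Nat) : Int) := by push_cast; ring
  simp only [PySem.List.pyRange_one, h2, Int.sub_zero, Int.toNat_natCast, List.map_map]
  apply List.map_congr_left
  intro i hi
  simp only [Function.comp_apply, zero_add]
  have hcombo :
      (List.range n).map ((fun j : Int =>
          decide (PySem.Int.mod (PySem.Int.floordiv (i : Int) ((2:Int) ^ ((n : Int) - 1 - j).toNat)) 2 = 0)) ∘ (fun k : Nat => (k : Int)))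
        = (List.range n).map (fun j => decide ((i / 2 ^ (n - 1 - j)) % 2 = 0)) := by
    apply List.map_congr_left
    intro j hj
    simp only [List.mem_range] at hj
    simp only [Function.comp_apply]
    have hexp : (((n:Int) - 1 - (j:Int))).toNat = n - 1 - j := by omega
    have hcast : ((2:Int) ^ (n - 1 - j)) = ((2 ^ (n - 1 - j) : Nat) : Int) := by push_cast; ring
    rw [hexp, hcast, PySem.Int.floordiv_natCast]
    have hmod : PySem.Int.mod ((i / 2 ^ (n - 1 - j) : Nat) : Int) 2 = (((i / 2 ^ (n - 1 - j)) % 2 : Nat) : Int) := by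
      exact_mod_cast PySem.Int.mod_natCast _ 2
    rw [hmod]
    exact decide_eq_decide.mpr (by omega)
  rw [hcombo]

-- ===== VERDICT (by name: the statement is the Claim_ definition above) =====
theorem generate_envs_spec : Claim_equal_generate_envs := by
  intro atom_names _ hpre
  unfold Spec_generate_envs generate_envs
  rw [pvBuildCombos_eq atom_names hpre, generate_envs_alt_eq]
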